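-- pv_equiv track=rewrite | github.com/cmbi/hommod | hommod_rest/services/domainalign.py | getTemplateSeqAtTargetPositions
-- ===== SOURCE A (Python) =====
-- def getTemplateSeqAtTargetPositions(alignment, startInTarget, endInTarget):
--
--     targetStart = 0
--     while not alignment['target'][targetStart].isalpha():
--         targetStart += 1
--
--     start = targetStart
--     nAA = 0
--     while nAA < startInTarget and start < len(alignment['target']):
--         if alignment['target'][start].isalpha():
--             nAA += 1
--         start += 1
--
--     end = start
--     nAA = 0
--     while nAA < (endInTarget - startInTarget) and \
--             end < len(alignment['target']):
--
--         if alignment['target'][end].isalpha():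
--             nAA += 1
--         end += 1
--
--     return alignment['template'][start: end]
-- ===== SOURCE B (Python) =====
-- def getTemplateSeqAtTargetPositions(alignment, startInTarget, endInTarget):
--     target = alignment['target']
--     template = alignment['template']
--
--     # alignment indices of all target residues, built in one pass
--     positions = [i for i, c in enumerate(target) if c.isalpha()]
--     n = len(positions)
--     L = len(target)
--
--     # start: one past the startInTarget-th residue (clamped to L),
--     # or the first residue position when startInTarget <= 0
--     if startInTarget <= 0:
--         start = positions[0]
--         base = 0
--     elif startInTarget <= n:
--         start = positions[startInTarget - 1] + 1
--         base = startInTarget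
--     else:
--         start = L
--         base = n
--
--     # end: count endInTarget - startInTarget further residues from start
--     k = endInTarget - startInTarget
--     if k <= 0:
--         end = start
--     elif base + k <= n:
--         end = positions[base + k - 1] + 1
--     else:
--         end = L
--
--     return template[start:end]
-- ===== Notes on version B (the rewrite author's own statement) =====
-- stated objective: alternative
-- what changed: Replaces A's three sequential character-scanning while loops with one pass that builds the index list of all residue (alphabetic) positions and then computes the slice bounds by direct arithmetic indexing into that list.
import Mathlib
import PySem

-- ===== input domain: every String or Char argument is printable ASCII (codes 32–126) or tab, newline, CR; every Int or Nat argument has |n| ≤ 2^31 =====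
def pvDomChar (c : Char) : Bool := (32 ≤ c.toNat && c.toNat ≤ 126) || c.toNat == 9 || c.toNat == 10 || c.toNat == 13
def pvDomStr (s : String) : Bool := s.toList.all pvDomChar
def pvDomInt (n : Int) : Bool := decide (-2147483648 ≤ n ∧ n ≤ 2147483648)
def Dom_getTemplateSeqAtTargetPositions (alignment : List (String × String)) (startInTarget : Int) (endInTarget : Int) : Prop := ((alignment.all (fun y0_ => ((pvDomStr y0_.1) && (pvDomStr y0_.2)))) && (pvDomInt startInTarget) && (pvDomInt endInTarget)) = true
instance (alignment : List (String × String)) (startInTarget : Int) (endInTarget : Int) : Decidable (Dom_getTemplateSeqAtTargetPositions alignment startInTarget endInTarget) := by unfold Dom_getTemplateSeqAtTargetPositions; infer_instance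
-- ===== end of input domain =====

-- B replaces A's three character-scanning while loops by one pass collecting the residue
-- (alphabetic) positions and closed-form index arithmetic on that list; same O(L) cost.


-- ===== PORT A =====
-- `while not alignment['target'][targetStart].isalpha(): targetStart += 1`
-- (returns cs.length where Python raises IndexError; those inputs are outside Pre_)
def pvFirstAlpha (cs : List Char) (i : Nat) : Nat :=
  if h : i < cs.length then
    if PySem.Chars.isalpha cs[i] then i else pvFirstAlpha cs (i + 1)
  else cs.length
termination_by cs.length - i

-- `while nAA < lim and i < len(cs): (count alpha) ; i += 1`, returning the final i
def pvAdvance (cs : List Char) (i : Nat) (nAA lim : Int) : Nat :=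
  if h : nAA < lim ∧ i < cs.length then
    pvAdvance cs (i + 1) (if PySem.Chars.isalpha cs[i] then nAA + 1 else nAA) lim
  else i
termination_by cs.length - i

def getTemplateSeqAtTargetPositions (alignment : List (String × String)) (startInTarget : Int) (endInTarget : Int) : String :=
  let target := ((alignment.lookup "target").getD "").toList
  let template := ((alignment.lookup "template").getD "").toList
  let targetStart := pvFirstAlpha target 0
  let start := pvAdvance target targetStart 0 startInTarget
  let «end» := pvAdvance target start 0 (endInTarget - startInTarget)
  String.ofList (PySem.List.slice template (some (start : Int)) (some ((«end» : Int))))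

-- ===== PORT B =====
-- `[i for i, c in enumerate(target) if c.isalpha()]`, with i starting at the given offset
def pvPositions (cs : List Char) (i : Nat) : List Nat :=
  match cs with
  | [] => []
  | c :: rest => if PySem.Chars.isalpha c then i :: pvPositions rest (i + 1) else pvPositions rest (i + 1)

def getTemplateSeqAtTargetPositions_alt (alignment : List (String × String)) (startInTarget : Int) (endInTarget : Int) : String :=
  let target := ((alignment.lookup "target").getD "").toList
  let template := ((alignment.lookup "template").getD "").toList
  let ps := pvPositions target 0
  let n := ps.length
  let L := target.length
  -- (positions[0] raises IndexError in Source B when ps = []; those inputs are outside Pre_)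
  let start : Nat :=
    if startInTarget ≤ 0 then ps.headD 0
    else if startInTarget ≤ (n : Int) then ps.getD (startInTarget.toNat - 1) 0 + 1
    else L
  let base : Nat := if startInTarget ≤ 0 then 0 else min startInTarget.toNat n
  let k := endInTarget - startInTarget
  let «end» : Nat :=
    if k ≤ 0 then start
    else if base + k.toNat ≤ n then ps.getD (base + k.toNat - 1) 0 + 1
    else L
  String.ofList (PySem.List.slice template (some (start : Int)) (some ((«end» : Int))))

-- ===== PRECONDITION & SPEC =====
def pvHasAlphaTarget (alignment : List (String × String)) : Bool :=
  match alignment.lookup "target" with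
  | some t => t.toList.any PySem.Chars.isalpha
  | none => false

-- Pre_ excludes exactly the inputs where Python A raises: a missing 'target'/'template'
-- key (KeyError) or a target with no alphabetic character (IndexError in the first loop).
def Pre_getTemplateSeqAtTargetPositions (alignment : List (String × String)) (startInTarget : Int) (endInTarget : Int) : Prop :=
  pvHasAlphaTarget alignment = true ∧ (alignment.lookup "template").isSome = true
instance (alignment : List (String × String)) (startInTarget : Int) (endInTarget : Int) : Decidable (Pre_getTemplateSeqAtTargetPositions alignment startInTarget endInTarget) := by unfold Pre_getTemplateSeqAtTargetPositions; infer_instance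

def pvWitness_getTemplateSeqAtTargetPositions : (List (String × String)) × Int × Int :=
  ([("target", "ab-cd"), ("template", "VWXYZ")], 1, 3)

def Spec_getTemplateSeqAtTargetPositions (alignment : List (String × String)) (startInTarget : Int) (endInTarget : Int) (out : String) : Prop := out = getTemplateSeqAtTargetPositions_alt alignment startInTarget endInTarget
instance (alignment : List (String × String)) (startInTarget : Int) (endInTarget : Int) (out : String) : Decidable (Spec_getTemplateSeqAtTargetPositions alignment startInTarget endInTarget out) := by unfold Spec_getTemplateSeqAtTargetPositions; infer_instance

-- ===== CLAIM (what is proved, stated in full; the proofs are below) =====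
def Claim_equal_getTemplateSeqAtTargetPositions : Prop := ∀ (alignment : List (String × String)) (startInTarget : Int) (endInTarget : Int), Dom_getTemplateSeqAtTargetPositions alignment startInTarget endInTarget → Pre_getTemplateSeqAtTargetPositions alignment startInTarget endInTarget → Spec_getTemplateSeqAtTargetPositions alignment startInTarget endInTarget (getTemplateSeqAtTargetPositions alignment startInTarget endInTarget)

-- ===== LEMMAS AND PROOFS =====

-- every collected position lies in [j, j + cs.length)
theorem pvPositions_bounds (cs : List Char) (j : Nat) :
    ∀ x ∈ pvPositions cs j, j ≤ x ∧ x < j + cs.length := by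
  induction cs generalizing j with
  | nil => simp [pvPositions]
  | cons c rest ih =>
    intro x hx
    simp only [pvPositions] at hx
    split at hx
    · rcases List.mem_cons.mp hx with rfl | hx
      · simp
      · have := ih (j + 1) x hx; constructor <;> [omega; (simp only [List.length_cons]; omega)]
    · have := ih (j + 1) x hx; constructor <;> [omega; (simp only [List.length_cons]; omega)]

theorem pvPositions_sorted (cs : List Char) (j : Nat) :
    (pvPositions cs j).Pairwise (· < ·) := by
  induction cs generalizing j with
  | nil => simp [pvPositions]
  | cons c rest ih =>
    simp only [pvPositions]
    split
    · exact List.pairwise_cons.mpr ⟨fun x hx => by have := pvPositions_bounds rest (j + 1) x hx; omega, ih (j + 1)⟩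
    · exact ih (j + 1)

theorem pvPositions_drop (cs : List Char) (j i : Nat) :
    pvPositions (cs.drop i) (j + i) = (pvPositions cs j).filter (fun x => j + i ≤ x) := by
  induction cs generalizing j i with
  | nil => simp [pvPositions]
  | cons c rest ih =>
    cases i with
    | zero =>
      simp only [List.drop_zero, Nat.add_zero]
      exact (List.filter_eq_self.mpr (fun x hx => by
        have := pvPositions_bounds (c :: rest) j x hx; simpa using this.1)).symm
    | succ i' =>
      simp only [List.drop_succ_cons, pvPositions]
      have h1 : j + (i' + 1) = (j + 1) + i' := by omega
      rw [h1, ih (j + 1) i']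
      split
      · rw [List.filter_cons]
        have : ¬ ((j + 1) + i' ≤ j) := by omega
        simp [this]
      · rfl

theorem pvFirstAlpha_spec (cs : List Char) (i : Nat) (hi : i ≤ cs.length) :
    pvFirstAlpha cs i = match pvPositions (cs.drop i) i with
      | [] => cs.length
      | p :: _ => p := by
  induction hk : cs.length - i generalizing i with
  | zero =>
    have hi' : i = cs.length := by omega
    subst hi'
    rw [pvFirstAlpha, dif_neg (by omega), List.drop_length]
    simp [pvPositions]
  | succ k ih =>
    have hlt : i < cs.length := by omega
    have hdrop : cs.drop i = cs[i] :: cs.drop (i + 1) := List.drop_eq_getElem_cons hlt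
    rw [pvFirstAlpha, dif_pos hlt, hdrop]
    simp only [pvPositions]
    by_cases ha : PySem.Chars.isalpha cs[i]
    · simp [ha]
    · rw [if_neg ha, if_neg ha]
      exact ih (i + 1) (by omega) (by omega)

theorem pvAdvance_spec (cs : List Char) (i : Nat) (n lim : Int) (hi : i ≤ cs.length) :
    pvAdvance cs i n lim =
      if lim ≤ n then i
      else match (pvPositions (cs.drop i) i)[(lim - n).toNat - 1]? with
        | some p => p + 1
        | none => cs.length := by
  induction hk : cs.length - i generalizing i n with
  | zero =>
    have hi' : i = cs.length := by omega
    subst hi'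
    rw [pvAdvance, dif_neg (by omega), List.drop_length]
    by_cases h : lim ≤ n
    · rw [if_pos h]
    · rw [if_neg h]
      simp [pvPositions]
  | succ k ih =>
    have hlt : i < cs.length := by omega
    have hdrop : cs.drop i = cs[i] :: cs.drop (i + 1) := List.drop_eq_getElem_cons hlt
    rw [pvAdvance]
    by_cases hnl : n < lim
    · rw [dif_pos ⟨hnl, hlt⟩, hdrop]
      simp only [pvPositions]
      by_cases ha : PySem.Chars.isalpha cs[i]
      · rw [if_pos ha, if_pos ha, ih (i + 1) (n + 1) (by omega) (by omega),
          if_neg (show ¬ lim ≤ n by omega)]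
        by_cases hle : lim ≤ n + 1
        · rw [if_pos hle]
          have h0 : (lim - n).toNat - 1 = 0 := by omega
          simp [h0]
        · rw [if_neg hle]
          have e1 : (lim - n).toNat - 1 = ((lim - (n + 1)).toNat - 1) + 1 := by omega
          rw [e1]
          simp
      · rw [if_neg ha, if_neg ha, ih (i + 1) n (by omega) (by omega),
          if_neg (show ¬ lim ≤ n by omega), if_neg (show ¬ lim ≤ n by omega)]
    · rw [dif_neg (by omega), if_pos (by omega)]

-- in a strictly increasing list, filtering above the m-th element drops the first m+1
theorem pv_filter_gt_get (ps : List Nat) (hps : ps.Pairwise (· < ·)) :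
    ∀ (m : Nat) (p : Nat), ps[m]? = some p →
      ps.filter (fun x => p + 1 ≤ x) = ps.drop (m + 1) := by
  induction ps with
  | nil => intro m p h; simp at h
  | cons q tl ih =>
    intro m p h
    have hq : ∀ x ∈ tl, q < x := (List.pairwise_cons.mp hps).1
    cases m with
    | zero =>
      have hqp : q = p := by simpa using h
      subst hqp
      rw [List.drop_succ_cons, List.drop_zero, List.filter_cons_of_neg (by simp)]
      refine List.filter_eq_self.mpr (fun x hx => ?_)
      have := hq x hx
      simp only [decide_eq_true_eq]
      omega
    | succ m' =>
      simp only [List.getElem?_cons_succ] at h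
      have hp : p ∈ tl := List.mem_of_getElem? h
      have hqp : q < p := hq p hp
      rw [List.filter_cons_of_neg (by simp; omega)]
      exact ih (List.pairwise_cons.mp hps).2 m' p h

theorem pv_filter_head (ps : List Nat) (hps : ps.Pairwise (· < ·)) (p : Nat) (tl : List Nat)
    (h : ps = p :: tl) : ps.filter (fun x => p ≤ x) = ps := by
  subst h
  refine List.filter_eq_self.mpr (fun x hx => ?_)
  rcases List.mem_cons.mp hx with rfl | hx
  · simp
  · have := (List.pairwise_cons.mp hps).1 x hx; simp; omega


theorem pvPositions_ne_nil (cs : List Char) (j : Nat)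
    (h : cs.any PySem.Chars.isalpha = true) : pvPositions cs j ≠ [] := by
  induction cs generalizing j with
  | nil => simp at h
  | cons c rest ih =>
    simp only [List.any_cons, Bool.or_eq_true] at h
    simp only [pvPositions]
    rcases h with h | h
    · simp [h]
    · split
      · simp
      · exact ih (j + 1) h

-- A's first two loops land exactly at B's closed-form start index
theorem pv_start_eq (t : List Char) (s : Int) (hA : t.any PySem.Chars.isalpha = true) :
    pvAdvance t (pvFirstAlpha t 0) 0 s =
      (if s ≤ 0 then (pvPositions t 0).headD 0
       else if s ≤ ((pvPositions t 0).length : Int) then (pvPositions t 0).getD (s.toNat - 1) 0 + 1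
       else t.length) := by
  obtain ⟨p0, tl, hcons⟩ : ∃ p0 tl, pvPositions t 0 = p0 :: tl := by
    cases hq : pvPositions t 0 with
    | nil => exact absurd hq (pvPositions_ne_nil t 0 hA)
    | cons p0 tl => exact ⟨p0, tl, rfl⟩
  have hsorted := pvPositions_sorted t 0
  have hp0 : p0 < t.length := by
    have := pvPositions_bounds t 0 p0 (by rw [hcons]; exact List.mem_cons_self)
    omega
  have hfa : pvFirstAlpha t 0 = p0 := by
    rw [pvFirstAlpha_spec t 0 (Nat.zero_le _), List.drop_zero, hcons]
  have hdrop0 : pvPositions (t.drop p0) p0 = pvPositions t 0 := by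
    have h := pvPositions_drop t 0 p0
    simp only [Nat.zero_add] at h
    rw [h, pv_filter_head _ hsorted p0 tl hcons]
  rw [hfa, pvAdvance_spec t p0 0 s (by omega), hdrop0, hcons]
  by_cases hs : s ≤ 0
  · rw [if_pos hs, if_pos hs]
    rfl
  · rw [if_neg hs, if_neg hs]
    by_cases hsn : s ≤ ((p0 :: tl).length : Int)
    · rw [if_pos hsn]
      have hd : s.toNat - 1 < (p0 :: tl).length := by
        simp only [List.length_cons] at hsn ⊢
        omega
      rw [Int.sub_zero, List.getElem?_eq_getElem hd]
      rw [List.getD_eq_getElem?_getD, List.getElem?_eq_getElem hd]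
      rfl
    · rw [if_neg hsn, Int.sub_zero, List.getElem?_eq_none]
      simp only [List.length_cons] at hsn ⊢
      omega

-- A's third loop lands exactly at B's closed-form end index
theorem pv_end_eq (t : List Char) (s e : Int) (hA : t.any PySem.Chars.isalpha = true) :
    pvAdvance t (pvAdvance t (pvFirstAlpha t 0) 0 s) 0 (e - s) =
      (if e - s ≤ 0 then
         (if s ≤ 0 then (pvPositions t 0).headD 0
          else if s ≤ ((pvPositions t 0).length : Int) then (pvPositions t 0).getD (s.toNat - 1) 0 + 1
          else t.length)
       else if (if s ≤ 0 then 0 else min s.toNat (pvPositions t 0).length) + (e - s).toNat ≤ (pvPositions t 0).length then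
         (pvPositions t 0).getD ((if s ≤ 0 then 0 else min s.toNat (pvPositions t 0).length) + (e - s).toNat - 1) 0 + 1
       else t.length) := by
  obtain ⟨p0, tl, hcons⟩ : ∃ p0 tl, pvPositions t 0 = p0 :: tl := by
    cases hq : pvPositions t 0 with
    | nil => exact absurd hq (pvPositions_ne_nil t 0 hA)
    | cons p0 tl => exact ⟨p0, tl, rfl⟩
  have hsorted := pvPositions_sorted t 0
  have hbounds := pvPositions_bounds t 0
  have hp0 : p0 < t.length := by
    have := hbounds p0 (by rw [hcons]; exact List.mem_cons_self)
    omega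
  have hdropP : ∀ m : Nat, pvPositions (t.drop m) m = (pvPositions t 0).filter (fun x => m ≤ x) := by
    intro m
    have h := pvPositions_drop t 0 m
    simp only [Nat.zero_add] at h
    exact h
  rw [pv_start_eq t s hA, hcons]
  by_cases hk : e - s ≤ 0
  · -- third loop does not run
    rw [if_pos hk]
    by_cases hs : s ≤ 0
    · rw [if_pos hs, pvAdvance_spec t _ 0 (e - s) (by simp; omega), if_pos (by omega)]
    · rw [if_neg hs]
      by_cases hsn : s ≤ ((p0 :: tl).length : Int)
      · rw [if_pos hsn]
        have hd : s.toNat - 1 < (p0 :: tl).length := by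
          simp only [List.length_cons] at hsn ⊢; omega
        have hlt : (p0 :: tl).getD (s.toNat - 1) 0 < t.length := by
          rw [List.getD_eq_getElem?_getD, List.getElem?_eq_getElem hd]
          have := hbounds ((p0 :: tl)[s.toNat - 1]) (by rw [hcons]; exact List.getElem_mem hd)
          simpa using this.2
        rw [pvAdvance_spec t _ 0 (e - s) (by omega), if_pos (by omega)]
      · rw [if_neg hsn, pvAdvance_spec t _ 0 (e - s) le_rfl, if_pos (by omega)]
  · -- third loop runs: k = (e - s).toNat ≥ 1 residues still to count
    rw [if_neg hk]
    have hk1 : 1 ≤ (e - s).toNat := by omega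
    by_cases hs : s ≤ 0
    · rw [if_pos hs, if_pos hs]
      have hq : pvPositions (t.drop ((p0 :: tl).headD 0)) ((p0 :: tl).headD 0) = p0 :: tl := by
        simp only [List.headD_cons]
        rw [hdropP p0, pv_filter_head _ hsorted p0 tl hcons, hcons]
      rw [pvAdvance_spec t _ 0 (e - s) (by simp; omega), if_neg (by omega), hq, Int.sub_zero]
      by_cases hcond : 0 + (e - s).toNat ≤ (p0 :: tl).length
      · rw [if_pos hcond]
        have hd : (e - s).toNat - 1 < (p0 :: tl).length := by omega
        rw [List.getElem?_eq_getElem hd, List.getD_eq_getElem?_getD]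
        rw [List.getElem?_eq_getElem (by omega : 0 + (e - s).toNat - 1 < (p0 :: tl).length)]
        simp only [Option.getD_some]
        congr 2
        omega
      · rw [if_neg hcond, List.getElem?_eq_none (by omega)]
    · rw [if_neg hs, if_neg hs]
      by_cases hsn : s ≤ ((p0 :: tl).length : Int)
      · rw [if_pos hsn]
        have hd : s.toNat - 1 < (p0 :: tl).length := by
          simp only [List.length_cons] at hsn ⊢; omega
        have hget : (p0 :: tl).getD (s.toNat - 1) 0 = (p0 :: tl)[s.toNat - 1] := by
          rw [List.getD_eq_getElem?_getD, List.getElem?_eq_getElem hd]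
          rfl
        have hlt : (p0 :: tl)[s.toNat - 1] < t.length := by
          have := hbounds ((p0 :: tl)[s.toNat - 1]) (by rw [hcons]; exact List.getElem_mem hd)
          simpa using this.2
        have hq : pvPositions (t.drop ((p0 :: tl).getD (s.toNat - 1) 0 + 1)) ((p0 :: tl).getD (s.toNat - 1) 0 + 1)
            = (p0 :: tl).drop (s.toNat - 1 + 1) := by
          rw [hget, hdropP, hcons,
            pv_filter_gt_get (p0 :: tl) (hcons ▸ hsorted) (s.toNat - 1) _ (List.getElem?_eq_getElem hd)]
        rw [pvAdvance_spec t _ 0 (e - s) (by omega), if_neg (by omega), hq, Int.sub_zero]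
        have hmin : min s.toNat (p0 :: tl).length = s.toNat := by
          simp only [List.length_cons] at hsn ⊢; omega
        rw [hmin, List.getElem?_drop]
        by_cases hcond : s.toNat + (e - s).toNat ≤ (p0 :: tl).length
        · rw [if_pos hcond]
          have hd2 : s.toNat - 1 + 1 + ((e - s).toNat - 1) < (p0 :: tl).length := by omega
          rw [List.getElem?_eq_getElem hd2, List.getD_eq_getElem?_getD,
            List.getElem?_eq_getElem (by omega : s.toNat + (e - s).toNat - 1 < (p0 :: tl).length)]
          simp only [Option.getD_some]
          congr 2
          omega
        · rw [if_neg hcond, List.getElem?_eq_none (by omega)]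
      · rw [if_neg hsn]
        have hmin : min s.toNat (p0 :: tl).length = (p0 :: tl).length := by
          simp only [List.length_cons] at hsn ⊢; omega
        have hq : pvPositions (t.drop t.length) t.length = [] := by
          rw [List.drop_length]; rfl
        rw [pvAdvance_spec t _ 0 (e - s) le_rfl, if_neg (by omega), hq, hmin,
          if_neg (by omega)]
        simp

-- ===== VERDICT (by name: the statement is the Claim_ definition above) =====
theorem getTemplateSeqAtTargetPositions_spec : Claim_equal_getTemplateSeqAtTargetPositions := by
  intro al s e _ hpre
  obtain ⟨hA, hT⟩ := hpre
  unfold Spec_getTemplateSeqAtTargetPositions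
  unfold getTemplateSeqAtTargetPositions getTemplateSeqAtTargetPositions_alt
  unfold pvHasAlphaTarget at hA
  cases ht : al.lookup "target" with
  | none => rw [ht] at hA; simp at hA
  | some tstr =>
    rw [ht] at hA
    dsimp only [Option.getD_some]
    have hA' : tstr.toList.any PySem.Chars.isalpha = true := by
      simpa using hA
    rw [pv_end_eq tstr.toList s e hA', pv_start_eq tstr.toList s hA']
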